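-- pv_equiv track=rewrite | github.com/MinhHaDuong/Oeconomia-Climate-finance | scripts/build_teaching_yaml.py | _infer_level
-- ===== SOURCE A (Python) =====
-- def _infer_level(course_name):
--     """Infer course level from name heuristics."""
--     low = course_name.lower()
--     if any(k in low for k in ("doctoral", "phd", "research seminar")):
--         return "doctoral"
--     if "mba" in low:
--         return "mba"
--     if any(k in low for k in ("mooc", "coursera", "edx", "online")):
--         return "mooc"
--     if any(k in low for k in ("master", "graduate", "msc", "m.sc")):
--         return "masters"
--     return "other"
-- ===== SOURCE B (Python) =====
-- _RANKED_KEYWORDS = [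
--     ("doctoral", 0), ("phd", 0), ("research seminar", 0),
--     ("mba", 1),
--     ("mooc", 2), ("coursera", 2), ("edx", 2), ("online", 2),
--     ("master", 3), ("graduate", 3), ("msc", 3), ("m.sc", 3),
-- ]
-- _LEVEL_NAMES = ["doctoral", "mba", "mooc", "masters", "other"]
--
--
-- def _infer_level(course_name):
--     """Infer course level: minimum priority over all matching keywords."""
--     low = course_name.lower()
--     best = 4
--     for kw, rank in _RANKED_KEYWORDS:
--         if kw in low and rank < best:
--             best = rank
--     return _LEVEL_NAMES[best]
-- ===== Notes on version B (the rewrite author's own statement) =====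
-- stated objective: alternative
-- what changed: Replaces the short-circuiting if-cascade over grouped keyword tests by a single exhaustive pass over a flat keyword->priority list that aggregates the minimum matching priority and indexes a level array with it.
import Mathlib
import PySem

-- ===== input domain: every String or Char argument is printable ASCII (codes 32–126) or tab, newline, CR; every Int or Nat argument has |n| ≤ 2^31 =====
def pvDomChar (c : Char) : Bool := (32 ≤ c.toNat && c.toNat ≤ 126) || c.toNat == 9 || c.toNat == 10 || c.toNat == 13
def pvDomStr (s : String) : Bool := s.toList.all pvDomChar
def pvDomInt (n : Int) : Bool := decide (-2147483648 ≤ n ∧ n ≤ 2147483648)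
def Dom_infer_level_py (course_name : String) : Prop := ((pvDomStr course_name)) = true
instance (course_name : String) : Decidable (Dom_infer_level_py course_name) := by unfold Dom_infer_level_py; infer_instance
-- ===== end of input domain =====

-- B replaces A's short-circuiting if-cascade by one exhaustive pass over a flat keyword->priority
-- list that keeps the minimum matching priority, then indexes a level array (alternative, same cost).

-- ===== PORT A =====
def infer_level_py (course_name : String) : String :=
  let low := PySem.Str.lower course_name
  if ["doctoral", "phd", "research seminar"].any (fun k => PySem.Str.isIn k low) then
    "doctoral"
  else if PySem.Str.isIn "mba" low then
    "mba"
  else if ["mooc", "coursera", "edx", "online"].any (fun k => PySem.Str.isIn k low) then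
    "mooc"
  else if ["master", "graduate", "msc", "m.sc"].any (fun k => PySem.Str.isIn k low) then
    "masters"
  else
    "other"

-- ===== PORT B =====
def pvRankedKeywords : List (String × Nat) :=
  [("doctoral", 0), ("phd", 0), ("research seminar", 0),
   ("mba", 1),
   ("mooc", 2), ("coursera", 2), ("edx", 2), ("online", 2),
   ("master", 3), ("graduate", 3), ("msc", 3), ("m.sc", 3)]

def pvLevelNames : List String := ["doctoral", "mba", "mooc", "masters", "other"]

def infer_level_py_alt (course_name : String) : String :=
  let low := PySem.Str.lower course_name
  let best := pvRankedKeywords.foldl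
    (fun best kr => if PySem.Str.isIn kr.1 low && kr.2 < best then kr.2 else best) 4
  pvLevelNames.getD best "other"

-- ===== PRECONDITION & SPEC =====
def Spec_infer_level_py (course_name : String) (out : String) : Prop := out = infer_level_py_alt course_name
instance (course_name : String) (out : String) : Decidable (Spec_infer_level_py course_name out) := by unfold Spec_infer_level_py; infer_instance

-- ===== CLAIM (what is proved, stated in full; the proofs are below) =====
def Claim_equal_infer_level_py : Prop := ∀ (course_name : String), Dom_infer_level_py course_name → Spec_infer_level_py course_name (infer_level_py course_name)

-- ===== LEMMAS AND PROOFS =====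

-- A's cascade, abstracted over the twelve membership booleans.
def pvAForm (d p rs mb mo co ed onl ma gr ms mdsc : Bool) : String :=
  if d || (p || (rs || false)) then "doctoral"
  else if mb then "mba"
  else if mo || (co || (ed || (onl || false))) then "mooc"
  else if ma || (gr || (ms || (mdsc || false))) then "masters"
  else "other"

-- B's min-fold, abstracted over the same booleans.
def pvBForm (d p rs mb mo co ed onl ma gr ms mdsc : Bool) : String :=
  let step : Nat → Bool × Nat → Nat := fun best br => if br.1 && br.2 < best then br.2 else best
  let best := [(d,0),(p,0),(rs,0),(mb,1),(mo,2),(co,2),(ed,2),(onl,2),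
               (ma,3),(gr,3),(ms,3),(mdsc,3)].foldl step 4
  pvLevelNames.getD best "other"

theorem pvForms_eq : ∀ d p rs mb mo co ed onl ma gr ms mdsc : Bool,
    pvAForm d p rs mb mo co ed onl ma gr ms mdsc = pvBForm d p rs mb mo co ed onl ma gr ms mdsc := by
  decide

-- ===== VERDICT (by name: the statement is the Claim_ definition above) =====
set_option maxHeartbeats 2000000 in
theorem infer_level_py_spec : Claim_equal_infer_level_py := by
  intro s _
  unfold Spec_infer_level_py
  have hA : infer_level_py s =
      pvAForm (PySem.Str.isIn "doctoral" (PySem.Str.lower s)) (PySem.Str.isIn "phd" (PySem.Str.lower s))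
        (PySem.Str.isIn "research seminar" (PySem.Str.lower s)) (PySem.Str.isIn "mba" (PySem.Str.lower s))
        (PySem.Str.isIn "mooc" (PySem.Str.lower s)) (PySem.Str.isIn "coursera" (PySem.Str.lower s))
        (PySem.Str.isIn "edx" (PySem.Str.lower s)) (PySem.Str.isIn "online" (PySem.Str.lower s))
        (PySem.Str.isIn "master" (PySem.Str.lower s)) (PySem.Str.isIn "graduate" (PySem.Str.lower s))
        (PySem.Str.isIn "msc" (PySem.Str.lower s)) (PySem.Str.isIn "m.sc" (PySem.Str.lower s)) := rfl
  have hB : infer_level_py_alt s =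
      pvBForm (PySem.Str.isIn "doctoral" (PySem.Str.lower s)) (PySem.Str.isIn "phd" (PySem.Str.lower s))
        (PySem.Str.isIn "research seminar" (PySem.Str.lower s)) (PySem.Str.isIn "mba" (PySem.Str.lower s))
        (PySem.Str.isIn "mooc" (PySem.Str.lower s)) (PySem.Str.isIn "coursera" (PySem.Str.lower s))
        (PySem.Str.isIn "edx" (PySem.Str.lower s)) (PySem.Str.isIn "online" (PySem.Str.lower s))
        (PySem.Str.isIn "master" (PySem.Str.lower s)) (PySem.Str.isIn "graduate" (PySem.Str.lower s))
        (PySem.Str.isIn "msc" (PySem.Str.lower s)) (PySem.Str.isIn "m.sc" (PySem.Str.lower s)) := rfl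
  rw [hA, hB, pvForms_eq]
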